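-- pv_equiv track=rewrite | github.com/akzic/hazaippo-backend | app/api/api_groups.py | _material_match_status_from_requests
-- ===== SOURCE A (Python) =====
-- def _norm_status(s) -> str:
--     if s is None:
--         return ""
--     return str(s).strip().lower()
--
-- def _is_accepted_status(s) -> bool:
--     return _norm_status(s) == "accepted"
--
-- def _is_completed_status(s) -> bool:
--     # RequestListScreen のコメントに pre_completed があったので吸収しておく
--     v = _norm_status(s)
--     return v in ("completed", "pre_completed")
--
-- def _material_match_status_from_requests(request_dicts: list[dict]) -> tuple[str, str, bool, bool]:
--     """
--     return:
--       - status_key: unmatched / matched / completed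
--       - status_label: 未マッチ / マッチ済 / 完了済
--       - has_accepted
--       - has_completed
--     """
--     has_accepted = False
--     has_completed = False
--
--     for r in request_dicts:
--         st = r.get("status")
--         if _is_completed_status(st):
--             has_completed = True
--         if _is_accepted_status(st):
--             has_accepted = True
--
--     if has_completed:
--         return "completed", "完了済", has_accepted, True
--     if has_accepted:
--         return "matched", "マッチ済", True, False
--     return "unmatched", "未マッチ", False, False
-- ===== SOURCE B (Python) =====
-- def _norm_status(s) -> str:
--     if s is None:
--         return ""
--     return str(s).strip().lower()
--
-- # Numeric encoding of status severity and the output table indexed by it.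
-- _RANK = {"completed": 2, "pre_completed": 2, "accepted": 1}
-- _SUMMARY = [("unmatched", "未マッチ"), ("matched", "マッチ済"), ("completed", "完了済")]
--
-- def _material_match_status_from_requests(request_dicts: list[dict]) -> tuple[str, str, bool, bool]:
--     # Stage 1: project every request onto its numeric rank.
--     ranks = [_RANK.get(_norm_status(r.get("status")), 0) for r in request_dicts]
--     # Stage 2: the overall level is the maximum rank; look the labels up in the table.
--     level = max(ranks, default=0)
--     key, label = _SUMMARY[level]
--     return (key, label, 1 in ranks if level == 2 else level == 1, level == 2)
-- ===== Notes on version B (the rewrite author's own statement) =====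
-- stated objective: alternative
-- what changed: B encodes each request's status as a numeric rank (completed/pre_completed=2, accepted=1, other=0), takes the maximum rank and reads the result from an indexed table, replacing A's two running boolean flags and the if-chain of returns; the has_accepted flag falls out of a membership test for rank 1.
import Mathlib
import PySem

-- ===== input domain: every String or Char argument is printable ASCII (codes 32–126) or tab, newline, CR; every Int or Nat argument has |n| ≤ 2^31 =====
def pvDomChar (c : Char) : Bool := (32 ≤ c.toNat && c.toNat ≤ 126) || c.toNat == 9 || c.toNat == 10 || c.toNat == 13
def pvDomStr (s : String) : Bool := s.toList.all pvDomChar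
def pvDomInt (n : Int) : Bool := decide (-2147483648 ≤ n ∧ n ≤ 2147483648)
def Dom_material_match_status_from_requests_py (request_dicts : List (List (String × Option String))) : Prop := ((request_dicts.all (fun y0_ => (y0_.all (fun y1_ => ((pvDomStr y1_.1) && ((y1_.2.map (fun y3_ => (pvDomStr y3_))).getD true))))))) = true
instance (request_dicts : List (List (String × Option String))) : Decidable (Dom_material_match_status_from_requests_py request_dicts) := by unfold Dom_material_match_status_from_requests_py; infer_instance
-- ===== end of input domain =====

-- B replaces A's two running boolean flags and if-chain by a numeric rank encoding:
-- map each request to a rank (completed/pre_completed=2, accepted=1, other=0), take the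
-- maximum and read the answer from an indexed table (alternative decomposition, same cost).

-- ===== PORT A =====
-- _norm_status: None -> "", else str(s).strip().lower()  (values are Optional[str], so str(s) = s)
def pyNormStatusA (s : Option String) : String :=
  match s with
  | none => ""
  | some t => PySem.Str.lower (PySem.Str.strip t)

def pyIsAcceptedStatusA (s : Option String) : Bool :=
  pyNormStatusA s == "accepted"

def pyIsCompletedStatusA (s : Option String) : Bool :=
  let v := pyNormStatusA s
  v == "completed" || v == "pre_completed"

-- the loop state is (has_accepted, has_completed)
def material_match_status_from_requests_py (request_dicts : List (List (String × Option String))) : String × String × Bool × Bool :=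
  let flags := request_dicts.foldl (fun (acc : Bool × Bool) r =>
      let st : Option String := PySem.Dict.getD (PySem.Dict.mk r) "status" none
      let acc := if pyIsCompletedStatusA st then (acc.1, true) else acc
      let acc := if pyIsAcceptedStatusA st then (true, acc.2) else acc
      acc) (false, false)
  if flags.2 then ("completed", "完了済", flags.1, true)
  else if flags.1 then ("matched", "マッチ済", true, false)
  else ("unmatched", "未マッチ", false, false)

-- ===== PORT B =====
def pyNormStatusB (s : Option String) : String :=
  match s with
  | none => ""
  | some t => PySem.Str.lower (PySem.Str.strip t)

-- the module constants _RANK and _SUMMARY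
def pvRankDict : PySem.Dict String Int :=
  PySem.Dict.mk [("completed", 2), ("pre_completed", 2), ("accepted", 1)]

def pvSummaryTable : List (String × String) :=
  [("unmatched", "未マッチ"), ("matched", "マッチ済"), ("completed", "完了済")]

def material_match_status_from_requests_py_alt (request_dicts : List (List (String × Option String))) : String × String × Bool × Bool :=
  -- stage 1: project every request onto its numeric rank
  let ranks : List Int := request_dicts.map (fun r =>
      PySem.Dict.getD pvRankDict (pyNormStatusB (PySem.Dict.getD (PySem.Dict.mk r) "status" none)) 0)
  -- stage 2: max(ranks, default=0), then table lookup _SUMMARY[level]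
  let level : Int := PySem.List.maxD ranks (fun x => x) 0
  -- level ∈ {0, 1, 2}, so the table lookup always succeeds; the getD default is never used
  let kl : String × String := (PySem.List.pyGet? pvSummaryTable level).getD ("unmatched", "未マッチ")
  (kl.1, kl.2, if level == 2 then ranks.contains 1 else level == 1, level == 2)

-- ===== PRECONDITION & SPEC =====
def Spec_material_match_status_from_requests_py (request_dicts : List (List (String × Option String))) (out : String × String × Bool × Bool) : Prop := out = material_match_status_from_requests_py_alt request_dicts
instance (request_dicts : List (List (String × Option String))) (out : String × String × Bool × Bool) : Decidable (Spec_material_match_status_from_requests_py request_dicts out) := by unfold Spec_material_match_status_from_requests_py; infer_instance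

-- ===== CLAIM (what is proved, stated in full; the proofs are below) =====
def Claim_equal_material_match_status_from_requests_py : Prop := ∀ (request_dicts : List (List (String × Option String))), Dom_material_match_status_from_requests_py request_dicts → Spec_material_match_status_from_requests_py request_dicts (material_match_status_from_requests_py request_dicts)

-- ===== LEMMAS AND PROOFS =====

-- A's loop computes "some element has that status" for each flag
theorem pvFoldFlags (rd : List (List (String × Option String))) (acc : Bool × Bool) :
    rd.foldl (fun (acc : Bool × Bool) r =>
      let st : Option String := PySem.Dict.getD (PySem.Dict.mk r) "status" none
      let acc := if pyIsCompletedStatusA st then (acc.1, true) else acc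
      let acc := if pyIsAcceptedStatusA st then (true, acc.2) else acc
      acc) acc
    = (acc.1 || rd.any (fun r => pyIsAcceptedStatusA (PySem.Dict.getD (PySem.Dict.mk r) "status" none)),
       acc.2 || rd.any (fun r => pyIsCompletedStatusA (PySem.Dict.getD (PySem.Dict.mk r) "status" none))) := by
  induction rd generalizing acc with
  | nil => simp
  | cons r tl ih =>
    simp only [List.foldl_cons, List.any_cons, ih]
    obtain ⟨a, c⟩ := acc
    by_cases hc : pyIsCompletedStatusA (PySem.Dict.getD (PySem.Dict.mk r) "status" none) <;>
      by_cases ha : pyIsAcceptedStatusA (PySem.Dict.getD (PySem.Dict.mk r) "status" none) <;>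
      simp [hc, ha]

-- a request's numeric rank, written by the status predicates
theorem pvRank (st : Option String) :
    PySem.Dict.getD pvRankDict (pyNormStatusB st) 0
    = if pyIsCompletedStatusA st then 2 else if pyIsAcceptedStatusA st then 1 else 0 := by
  have hv : pyNormStatusB st = pyNormStatusA st := rfl
  unfold pyIsCompletedStatusA pyIsAcceptedStatusA
  rw [hv]
  generalize pyNormStatusA st = v
  by_cases h1 : v = "completed"
  · subst h1; decide
  · by_cases h2 : v = "pre_completed"
    · subst h2; decide
    · by_cases h3 : v = "accepted"
      · subst h3; decide
      · have e1 : ("completed" == v) = false := by simpa using Ne.symm h1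
        have e2 : ("pre_completed" == v) = false := by simpa using Ne.symm h2
        have e3 : ("accepted" == v) = false := by simpa using Ne.symm h3
        simp [pvRankDict, PySem.Dict.getD, PySem.Dict.get?, List.find?, e1, e2, e3, h1, h2, h3]

-- a completed status is never the accepted status
theorem pvExcl (st : Option String) :
    pyIsCompletedStatusA st = true → pyIsAcceptedStatusA st = false := by
  unfold pyIsCompletedStatusA pyIsAcceptedStatusA
  generalize pyNormStatusA st = v
  simp only [Bool.or_eq_true, beq_iff_eq, beq_eq_false_iff_ne]
  rintro (rfl | rfl) <;> decide

-- the rank equals 1 exactly on accepted requests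
theorem pvRankOne (st : Option String) :
    ((if pyIsCompletedStatusA st then (2 : Int) else if pyIsAcceptedStatusA st then 1 else 0) = 1)
    ↔ pyIsAcceptedStatusA st = true := by
  by_cases hc : pyIsCompletedStatusA st
  · simp [hc, pvExcl st hc]
  · by_cases ha : pyIsAcceptedStatusA st <;> simp [hc, ha]

-- running max over the ranks
theorem pvMaxFold (rd : List (List (String × Option String))) (a : Int) (ha : 0 ≤ a) :
    (rd.map (fun r => if pyIsCompletedStatusA (PySem.Dict.getD (PySem.Dict.mk r) "status" none) then (2 : Int)
        else if pyIsAcceptedStatusA (PySem.Dict.getD (PySem.Dict.mk r) "status" none) then 1 else 0)).foldl max a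
    = max a (if rd.any (fun r => pyIsCompletedStatusA (PySem.Dict.getD (PySem.Dict.mk r) "status" none)) then 2
        else if rd.any (fun r => pyIsAcceptedStatusA (PySem.Dict.getD (PySem.Dict.mk r) "status" none)) then 1 else 0) := by
  induction rd generalizing a with
  | nil => simp; omega
  | cons r tl ih =>
    simp only [List.map_cons, List.foldl_cons, List.any_cons]
    rw [ih _ (by split_ifs <;> omega :
      (0:Int) ≤ max a (if pyIsCompletedStatusA (PySem.Dict.getD (PySem.Dict.mk r) "status" none) then 2
        else if pyIsAcceptedStatusA (PySem.Dict.getD (PySem.Dict.mk r) "status" none) then 1 else 0))]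
    by_cases hc : pyIsCompletedStatusA (PySem.Dict.getD (PySem.Dict.mk r) "status" none) <;>
      by_cases ha' : pyIsAcceptedStatusA (PySem.Dict.getD (PySem.Dict.mk r) "status" none) <;>
      by_cases htc : tl.any (fun r => pyIsCompletedStatusA (PySem.Dict.getD (PySem.Dict.mk r) "status" none)) <;>
      by_cases hta : tl.any (fun r => pyIsAcceptedStatusA (PySem.Dict.getD (PySem.Dict.mk r) "status" none)) <;>
      simp [hc, ha', htc, hta]


-- max(l, default=0) is the running max when every element is nonnegative
theorem pvMaxD0 (l : List Int) (h : ∀ x ∈ l, 0 ≤ x) :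
    PySem.List.maxD l (fun y => y) 0 = l.foldl max 0 := by
  cases l with
  | nil => rfl
  | cons x t =>
    have hx : (0 : Int) ≤ x := h x (by simp)
    simp [PySem.List.maxD, PySem.List.max?_id_cons, max_eq_right hx]

-- ===== VERDICT (by name: the statement is the Claim_ definition above) =====
theorem material_match_status_from_requests_py_spec : Claim_equal_material_match_status_from_requests_py := by
  intro rd _
  show material_match_status_from_requests_py rd = material_match_status_from_requests_py_alt rd
  unfold material_match_status_from_requests_py material_match_status_from_requests_py_alt
  simp only [pvFoldFlags, Bool.false_or, pvRank]
  rw [pvMaxD0 _ (by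
    intro x hx
    simp only [List.mem_map] at hx
    obtain ⟨r, _, rfl⟩ := hx
    split_ifs <;> norm_num)]
  rw [pvMaxFold rd 0 le_rfl]
  by_cases hc : rd.any (fun r => pyIsCompletedStatusA (PySem.Dict.getD (PySem.Dict.mk r) "status" none)) <;>
    by_cases ha : rd.any (fun r => pyIsAcceptedStatusA (PySem.Dict.getD (PySem.Dict.mk r) "status" none))
  · obtain ⟨r, hr, hra⟩ := List.any_eq_true.mp ha
    simp [hc, ha, pvSummaryTable, PySem.List.pyGet?, PySem.List.pyIdx?]
    exact ⟨r, hr, (pvRankOne _).mpr hra⟩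
  · have ha' : rd.any (fun r => pyIsAcceptedStatusA (PySem.Dict.getD (PySem.Dict.mk r) "status" none)) = false := by
      simpa using ha
    have h0 := List.any_eq_false.mp ha'
    simp [hc, ha, pvSummaryTable, PySem.List.pyGet?, PySem.List.pyIdx?]
    intro x hx
    simp only [pvRankOne]
    simpa using h0 x hx
  · simp [hc, ha, pvSummaryTable, PySem.List.pyGet?, PySem.List.pyIdx?]
  · simp [hc, ha, pvSummaryTable, PySem.List.pyGet?, PySem.List.pyIdx?]
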